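-- pv_equiv track=rewrite | github.com/stanford-pnnl/covid-nlp | src/patient_db.py | get_age_colors_legend
-- ===== SOURCE A (Python) =====
-- def get_age_colors_legend(ages):
--     r_ages = []
--     avail_colors = ['b', 'g', 'r', 'c', 'm', 'y', 'k', 'w']
--     colors = []
--     legend = dict()
--     color_index = 0
--     for gender, gender_ages in ages.items():
--         r_ages.append(gender_ages)
--         color = avail_colors[color_index]
--         colors.append(color)
--         color_index += 1
--         legend[gender] = color
--     return r_ages, colors, legend
-- ===== SOURCE B (Python) =====
-- def get_age_colors_legend(ages):
--     avail_colors = ['b', 'g', 'r', 'c', 'm', 'y', 'k', 'w']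
--
--     def go(items, i):
--         # recursion on the item list; results assembled on the way back up
--         if not items:
--             return [], [], {}
--         (gender, gender_ages), rest = items[0], items[1:]
--         color = avail_colors[i]
--         r_tail, c_tail, l_tail = go(rest, i + 1)
--         return [gender_ages] + r_tail, [color] + c_tail, {gender: color, **l_tail}
--
--     return go(list(ages.items()), 0)
-- ===== Notes on version B (the rewrite author's own statement) =====
-- stated objective: alternative
-- what changed: Replaces A's single forward loop with mutable accumulators and a running color_index by a structural recursion over the item list that assembles all three results back-to-front on the way up, passing the color index as recursion depth and merging the legend with {gender: color, **tail}.
import Mathlib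
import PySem

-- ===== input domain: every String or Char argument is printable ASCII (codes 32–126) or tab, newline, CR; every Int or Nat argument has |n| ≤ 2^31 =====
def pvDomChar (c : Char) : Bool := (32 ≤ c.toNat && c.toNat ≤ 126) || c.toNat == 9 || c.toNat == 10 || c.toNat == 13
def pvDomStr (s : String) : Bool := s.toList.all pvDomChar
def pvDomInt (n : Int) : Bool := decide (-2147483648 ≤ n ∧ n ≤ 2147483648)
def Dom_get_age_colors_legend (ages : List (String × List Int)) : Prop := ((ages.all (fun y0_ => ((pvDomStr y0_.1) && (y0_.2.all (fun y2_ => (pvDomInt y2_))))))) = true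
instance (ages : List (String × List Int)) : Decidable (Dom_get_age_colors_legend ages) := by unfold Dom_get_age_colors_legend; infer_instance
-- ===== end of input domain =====

-- B replaces A's accumulator loop with a running color_index by a structural recursion assembling the three results back-to-front; objective: alternative decomposition, same cost.


-- ===== PORT A =====
-- avail_colors[color_index] is ported with pyGetD; Pre_ restricts to indices in range (Python raises IndexError past 8 genders).
def get_age_colors_legend (ages : List (String × List Int)) : List (List Int) × List String × (List (String × String)) :=
  let avail_colors : List String := ["b", "g", "r", "c", "m", "y", "k", "w"]
  let st := ages.foldl
    (fun (st : List (List Int) × List String × PySem.Dict String String × Int) gp =>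
      let color := PySem.List.pyGetD avail_colors st.2.2.2 ""
      (st.1 ++ [gp.2], st.2.1 ++ [color], (st.2.2.1).insert gp.1 color, st.2.2.2 + 1))
    ([], [], PySem.Dict.empty, 0)
  (st.1, st.2.1, (st.2.2.1).items)

-- ===== PORT B =====
-- go(items, i): recursion on the item list, color index = recursion depth; {gender: color, **l_tail} is
-- ported as (empty.insert gender color).update l_tail.items (dict literal then ** merge, insertion order).
def pvGoAlt (avail : List String) : List (String × List Int) → Nat → List (List Int) × List String × PySem.Dict String String
  | [], _ => ([], [], PySem.Dict.empty)
  | gp :: rest, i =>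
    let color := PySem.List.pyGetD avail (i : Int) ""
    let t := pvGoAlt avail rest (i + 1)
    ([gp.2] ++ t.1, [color] ++ t.2.1, (PySem.Dict.empty.insert gp.1 color).update t.2.2.items)

def get_age_colors_legend_alt (ages : List (String × List Int)) : List (List Int) × List String × (List (String × String)) :=
  let avail_colors : List String := ["b", "g", "r", "c", "m", "y", "k", "w"]
  let t := pvGoAlt avail_colors ages 0
  (t.1, t.2.1, t.2.2.items)

-- ===== PRECONDITION & SPEC =====
-- Pre_ excludes dicts with more than 8 entries (A and B raise IndexError there), and requires distinct
-- gender keys — the input stands for a Python dict, whose keys are unique by construction.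
def Pre_get_age_colors_legend (ages : List (String × List Int)) : Prop :=
  ages.length ≤ 8 ∧ (ages.map Prod.fst).Nodup

instance (ages : List (String × List Int)) : Decidable (Pre_get_age_colors_legend ages) := by unfold Pre_get_age_colors_legend; infer_instance

def pvWitness_get_age_colors_legend : (List (String × List Int)) := [("M", [30, 41]), ("F", [25])]

def Spec_get_age_colors_legend (ages : List (String × List Int)) (out : List (List Int) × List String × (List (String × String))) : Prop := out = get_age_colors_legend_alt ages
instance (ages : List (String × List Int)) (out : List (List Int) × List String × (List (String × String))) : Decidable (Spec_get_age_colors_legend ages out) := by unfold Spec_get_age_colors_legend; infer_instance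

-- ===== CLAIM (what is proved, stated in full; the proofs are below) =====
def Claim_equal_get_age_colors_legend : Prop := ∀ (ages : List (String × List Int)), Dom_get_age_colors_legend ages → Pre_get_age_colors_legend ages → Spec_get_age_colors_legend ages (get_age_colors_legend ages)

-- ===== LEMMAS AND PROOFS =====

-- abbreviations used only in the proofs
def pvAvail : List String := ["b", "g", "r", "c", "m", "y", "k", "w"]
def pvColor (n : Nat) : String := PySem.List.pyGetD pvAvail (n : Int) ""
def pvStep (st : List (List Int) × List String × PySem.Dict String String × Int)
    (gp : String × List Int) : List (List Int) × List String × PySem.Dict String String × Int :=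
  let color := PySem.List.pyGetD pvAvail st.2.2.2 ""
  (st.1 ++ [gp.2], st.2.1 ++ [color], (st.2.2.1).insert gp.1 color, st.2.2.2 + 1)

-- the color list starting at index m, split at the head
theorem pv_colors_cons (len m : Nat) :
    (List.range (len + 1)).map (fun k => pvColor (m + k)) =
      pvColor m :: (List.range len).map (fun k => pvColor (m + 1 + k)) := by
  simp only [List.range_succ_eq_map, List.map_cons, List.map_map, Nat.add_zero]
  refine congrArg _ (List.map_congr_left ?_)
  intro k _
  show pvColor (m + (k + 1)) = pvColor (m + 1 + k)
  have hk : m + (k + 1) = m + 1 + k := by omega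
  rw [hk]

-- invariant of A's fused loop, accumulator generalized
theorem pv_loopA (ages : List (String × List Int)) (r : List (List Int)) (cs : List String)
    (lg : PySem.Dict String String) (n : Nat) :
    ages.foldl pvStep (r, cs, lg, (n : Int)) =
      (r ++ ages.map (fun p => p.2),
       cs ++ (List.range ages.length).map (fun k => pvColor (n + k)),
       ((ages.map (fun p => p.1)).zip ((List.range ages.length).map (fun k => pvColor (n + k)))).foldl
         (fun (d : PySem.Dict String String) p => d.insert p.1 p.2) lg,
       (n : Int) + ages.length) := by
  induction ages generalizing r cs lg n with
  | nil => simp [List.foldl]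
  | cons hd tl ih =>
    have hcast : (n : Int) + 1 = ((n + 1 : Nat) : Int) := by push_cast; ring
    have hstep : pvStep (r, cs, lg, (n : Int)) hd =
        (r ++ [hd.2], cs ++ [pvColor n], lg.insert hd.1 (pvColor n), ((n + 1 : Nat) : Int)) := by
      simp only [pvStep, pvColor]
      rw [hcast]
    rw [List.foldl_cons, hstep, ih]
    refine Prod.ext ?_ (Prod.ext ?_ (Prod.ext ?_ ?_))
    · simp
    · simp [pv_colors_cons tl.length n]
    · simp [pv_colors_cons tl.length n, List.foldl_cons]
    · simp only [List.length_cons]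
      push_cast
      ring

-- a fold of inserts over fresh distinct keys into the empty dict lists exactly those pairs
theorem pv_foldl_insert_items (ps : List (String × String)) (h : (ps.map Prod.fst).Nodup) :
    (ps.foldl (fun (d : PySem.Dict String String) p => d.insert p.1 p.2) PySem.Dict.empty).items = ps := by
  have := PySem.Dict.items_foldl_insert_fresh (l := ps) (k := Prod.fst) (v := Prod.snd)
    (d := (PySem.Dict.empty : PySem.Dict String String))
    (by intro a _; simp [PySem.Dict.contains_empty]) h
  simpa using this

-- B's recursion computes the same three components (keys Nodup)
theorem pv_goAlt_spec (items : List (String × List Int)) (n : Nat)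
    (h : (items.map Prod.fst).Nodup) :
    pvGoAlt pvAvail items n =
      (items.map (fun p => p.2),
       (List.range items.length).map (fun k => pvColor (n + k)),
       PySem.Dict.mk ((items.map (fun p => p.1)).zip ((List.range items.length).map (fun k => pvColor (n + k))))) := by
  induction items generalizing n with
  | nil => simp [pvGoAlt, PySem.Dict.empty]
  | cons hd tl ih =>
    simp only [List.map_cons, List.nodup_cons] at h
    have htl := ih (n + 1) h.2
    have hzlen : ((tl.map (fun p => p.1)).zip ((List.range tl.length).map (fun k => pvColor (n + 1 + k)))).map Prod.fst
        = tl.map (fun p => p.1) := by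
      rw [List.map_fst_zip]
      simp
    have hfresh : ∀ a ∈ (tl.map (fun p => p.1)).zip ((List.range tl.length).map (fun k => pvColor (n + 1 + k))),
        ((PySem.Dict.empty : PySem.Dict String String).insert hd.1 (pvColor n)).contains a.1 = false := by
      intro a ha
      have : a.1 ∈ tl.map (fun p => p.1) := by
        rw [← hzlen]; exact List.mem_map_of_mem ha
      have hne : a.1 ≠ hd.1 := fun he => h.1 (he ▸ this)
      simp [PySem.Dict.contains_insert, PySem.Dict.contains_empty, hne]
    have hznd : (((tl.map (fun p => p.1)).zip ((List.range tl.length).map (fun k => pvColor (n + 1 + k)))).map Prod.fst).Nodup := by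
      rw [hzlen]; exact h.2
    simp only [pvGoAlt, htl]
    refine Prod.ext ?_ (Prod.ext ?_ ?_)
    · simp
    · rw [List.length_cons, pv_colors_cons tl.length n]
      rfl
    · apply PySem.Dict.ext
      show ((PySem.Dict.empty.insert hd.1 (PySem.List.pyGetD pvAvail (n : Int) "")).update _).items = _
      rw [show (PySem.List.pyGetD pvAvail (n : Int) "") = pvColor n from rfl]
      have hupd : ∀ (d : PySem.Dict String String) (ps : List (String × String)),
          d.update ps = ps.foldl (fun d p => d.insert p.1 p.2) d := fun _ _ => rfl
      rw [hupd]
      have := PySem.Dict.items_foldl_insert_fresh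
        (l := (tl.map (fun p => p.1)).zip ((List.range tl.length).map (fun k => pvColor (n + 1 + k))))
        (k := Prod.fst) (v := Prod.snd)
        (d := (PySem.Dict.empty : PySem.Dict String String).insert hd.1 (pvColor n))
        hfresh hznd
      rw [this]
      simp [PySem.Dict.items_insert_of_not_contains, PySem.Dict.empty,
        List.length_cons, pv_colors_cons tl.length n]

theorem get_age_colors_legend_spec : Claim_equal_get_age_colors_legend := by
  intro ages _ hpre
  show get_age_colors_legend ages = get_age_colors_legend_alt ages
  simp only [get_age_colors_legend, get_age_colors_legend_alt]
  rw [show (fun (st : List (List Int) × List String × PySem.Dict String String × Int)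
      (gp : String × List Int) =>
      (st.1 ++ [gp.2], st.2.1 ++ [PySem.List.pyGetD ["b", "g", "r", "c", "m", "y", "k", "w"] st.2.2.2 ""],
        (st.2.2.1).insert gp.1 (PySem.List.pyGetD ["b", "g", "r", "c", "m", "y", "k", "w"] st.2.2.2 ""),
        st.2.2.2 + 1)) = pvStep from rfl]
  rw [show (0 : Int) = ((0 : Nat) : Int) from rfl, pv_loopA]
  rw [show (["b", "g", "r", "c", "m", "y", "k", "w"] : List String) = pvAvail from rfl,
    pv_goAlt_spec ages 0 hpre.2]
  simp only [Nat.zero_add]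
  have hznd : (((ages.map (fun p => p.1)).zip ((List.range ages.length).map (fun k => pvColor k))).map Prod.fst).Nodup := by
    rw [List.map_fst_zip]
    · exact hpre.2
    · simp
  rw [pv_foldl_insert_items _ hznd]
  simp
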